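-- pv_equiv track=rewrite | github.com/cheelan/NLP | p4/deception.py | text_to_char_list
-- ===== SOURCE A (Python) =====
-- def parse_line(text):
--     output = ""
--     i = 0
--     for c in text:
--         if i > 3:
--             output += c
--         i += 1
--     return output
--
-- def text_to_char_list(lst):
--     dchar_list = []
--     tchar_list = []
--     for line in lst:
--         if "IsTruthFul" in line:
--             continue
--         else:
--             if line[0] == "0": #If deceptive:
--                 dchar_list.append("<r>")
--                 for c in parse_line(line):
--                     dchar_list.append(c)
--                 dchar_list.append("</r>")
--             else:
--                 #If no label is present, then we are dealing with actual test data. Just throw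
--                 #things into the true list
--                 tchar_list.append("<r>")
--                 for c in parse_line(line):
--                     tchar_list.append(c)
--                 tchar_list.append("</r>")
--     return (dchar_list, tchar_list)
-- ===== SOURCE B (Python) =====
-- def text_to_char_list(lst):
--     kept = [line for line in lst if "IsTruthFul" not in line]
--     dchar_list = [tok for line in kept if line[0] == "0"
--                   for tok in ["<r>", *line[4:], "</r>"]]
--     tchar_list = [tok for line in kept if line[0] != "0"
--                   for tok in ["<r>", *line[4:], "</r>"]]
--     return (dchar_list, tchar_list)
-- ===== Notes on version B (the rewrite author's own statement) =====
-- stated objective: idiomatic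
-- what changed: A's single stateful loop with per-character appends and a counter-based parse_line is replaced by a filter of the 'IsTruthFul' lines followed by two independent comprehension passes that build each group by flattening ['<r>', *line[4:], '</r>'] segments, using a slice instead of the counting loop.
import Mathlib
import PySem

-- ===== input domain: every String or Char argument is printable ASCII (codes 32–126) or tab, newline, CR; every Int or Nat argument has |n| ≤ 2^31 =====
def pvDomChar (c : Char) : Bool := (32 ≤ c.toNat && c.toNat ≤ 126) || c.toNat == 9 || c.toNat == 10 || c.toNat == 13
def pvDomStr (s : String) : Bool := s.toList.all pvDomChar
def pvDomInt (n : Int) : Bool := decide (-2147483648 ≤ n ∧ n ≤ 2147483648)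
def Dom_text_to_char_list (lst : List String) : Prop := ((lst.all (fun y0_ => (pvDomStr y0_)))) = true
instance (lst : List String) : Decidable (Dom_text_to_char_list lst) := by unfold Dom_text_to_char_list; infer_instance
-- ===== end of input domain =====

-- B replaces A's stateful append loop by a filter plus two independent flatten passes (objective: idiomatic).

-- ===== PORT A =====
-- A's parse_line: builds output char by char, keeping chars whose running index exceeds 3.
def parse_line (text : String) : String :=
  String.ofList
    (text.toList.foldl
      (fun (acc : List Char × Int) c =>
        (if acc.2 > 3 then acc.1 ++ [c] else acc.1, acc.2 + 1))
      (([] : List Char), (0 : Int))).1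

def text_to_char_list (lst : List String) : List String × List String :=
  lst.foldl
    (fun (acc : List String × List String) line =>
      if PySem.Str.isIn "IsTruthFul" line then acc
      else if PySem.Str.pyGet? line 0 = some '0' then
        (((parse_line line).toList.foldl
            (fun a c => a ++ [String.ofList [c]]) (acc.1 ++ ["<r>"])) ++ ["</r>"],
         acc.2)
      else
        (acc.1,
         ((parse_line line).toList.foldl
            (fun a c => a ++ [String.ofList [c]]) (acc.2 ++ ["<r>"])) ++ ["</r>"]))
    (([] : List String), ([] : List String))

-- ===== PORT B =====
-- one segment ["<r>", *line[4:], "</r>"]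
def pvSeg (line : String) : List String :=
  "<r>" :: (PySem.List.slice line.toList (some 4) none).map (fun c => String.ofList [c]) ++ ["</r>"]

def text_to_char_list_alt (lst : List String) : List String × List String :=
  let kept := lst.filter (fun line => !PySem.Str.isIn "IsTruthFul" line)
  ((kept.filter (fun line => PySem.Str.pyGet? line 0 = some '0')).flatMap pvSeg,
   (kept.filter (fun line => ¬ PySem.Str.pyGet? line 0 = some '0')).flatMap pvSeg)

-- ===== PRECONDITION & SPEC =====
-- Pre_ excludes exactly the inputs on which Python A raises IndexError: a kept (non-'IsTruthFul') empty line.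
def Pre_text_to_char_list (lst : List String) : Prop :=
  ∀ line ∈ lst, PySem.Str.isIn "IsTruthFul" line = true ∨ line.toList ≠ []
instance (lst : List String) : Decidable (Pre_text_to_char_list lst) := by
  unfold Pre_text_to_char_list; infer_instance

def pvWitness_text_to_char_list : List String :=
  ["0,1,this room was bad", "1,0,nice stay", "xIsTruthFulx"]

def Spec_text_to_char_list (lst : List String) (out : List String × List String) : Prop := out = text_to_char_list_alt lst
instance (lst : List String) (out : List String × List String) : Decidable (Spec_text_to_char_list lst out) := by unfold Spec_text_to_char_list; infer_instance

-- ===== CLAIM (what is proved, stated in full; the proofs are below) =====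
def Claim_equal_text_to_char_list : Prop := ∀ (lst : List String), Dom_text_to_char_list lst → Pre_text_to_char_list lst → Spec_text_to_char_list lst (text_to_char_list lst)

-- ===== LEMMAS AND PROOFS =====

-- the counting loop of parse_line drops the first (4 - i) characters
theorem parse_go (cs : List Char) (out : List Char) (i : Int) (h : 0 ≤ i) :
    (cs.foldl (fun (acc : List Char × Int) c =>
        (if acc.2 > 3 then acc.1 ++ [c] else acc.1, acc.2 + 1)) (out, i)).1
      = out ++ cs.drop (4 - i).toNat := by
  induction cs generalizing out i with
  | nil => simp
  | cons c rest ih =>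
    simp only [List.foldl_cons]
    by_cases hc : i > 3
    · simp only [hc, if_pos]
      rw [ih (out ++ [c]) (i + 1) (by omega)]
      have h1 : (4 - i).toNat = 0 := by omega
      have h2 : (4 - (i + 1)).toNat = 0 := by omega
      simp [h1, h2]
    · simp only [hc, if_false]
      rw [ih out (i + 1) (by omega)]
      have h1 : (4 - i).toNat = (4 - (i + 1)).toNat + 1 := by omega
      rw [h1]
      simp
    
theorem parse_line_eq (line : String) :
    (parse_line line).toList = line.toList.drop 4 := by
  unfold parse_line
  rw [parse_go line.toList [] 0 (by omega)]
  simp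

theorem seg_eq (acc : List String) (line : String) :
    (parse_line line).toList.foldl (fun a c => a ++ [String.ofList [c]]) (acc ++ ["<r>"]) ++ ["</r>"]
      = acc ++ pvSeg line := by
  rw [PySem.List.foldl_append_singleton_eq_map, parse_line_eq]
  simp [pvSeg, pysem]

theorem alt_skip (line : String) (rest : List String) (h : PySem.Str.isIn "IsTruthFul" line = true) :
    text_to_char_list_alt (line :: rest) = text_to_char_list_alt rest := by
  have h' : (['I','s','T','r','u','t','h','F','u','l'] <:+: line.toList) := by
    simpa [pysem] using h
  simp [text_to_char_list_alt, PySem.Chars.isIn_eq_false_iff, h']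

theorem alt_d (line : String) (rest : List String) (h : ¬ PySem.Str.isIn "IsTruthFul" line = true)
    (h2 : PySem.Str.pyGet? line 0 = some '0') :
    text_to_char_list_alt (line :: rest)
      = (pvSeg line ++ (text_to_char_list_alt rest).1, (text_to_char_list_alt rest).2) := by
  have h' : ¬ (['I','s','T','r','u','t','h','F','u','l'] <:+: line.toList) := by
    simpa [pysem] using h
  have h2' : PySem.List.pyGet? line.toList 0 = some '0' := by
    simpa only [PySem.Str.pyGet?_eq, PySem.Chars.pyGet?_eq_listPyGet?] using h2
  simp [text_to_char_list_alt, PySem.Chars.isIn_eq_false_iff, h', h2']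

theorem alt_t (line : String) (rest : List String) (h : ¬ PySem.Str.isIn "IsTruthFul" line = true)
    (h2 : ¬ PySem.Str.pyGet? line 0 = some '0') :
    text_to_char_list_alt (line :: rest)
      = ((text_to_char_list_alt rest).1, pvSeg line ++ (text_to_char_list_alt rest).2) := by
  have h' : ¬ (['I','s','T','r','u','t','h','F','u','l'] <:+: line.toList) := by
    simpa [pysem] using h
  have h2' : ¬ PySem.List.pyGet? line.toList 0 = some '0' := by
    simpa only [PySem.Str.pyGet?_eq, PySem.Chars.pyGet?_eq_listPyGet?] using h2
  simp [text_to_char_list_alt, PySem.Chars.isIn_eq_false_iff, h', h2']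

theorem fold_eq (lst : List String) (d t : List String) :
    lst.foldl
      (fun (acc : List String × List String) line =>
        if PySem.Str.isIn "IsTruthFul" line then acc
        else if PySem.Str.pyGet? line 0 = some '0' then
          (((parse_line line).toList.foldl
              (fun a c => a ++ [String.ofList [c]]) (acc.1 ++ ["<r>"])) ++ ["</r>"],
           acc.2)
        else
          (acc.1,
           ((parse_line line).toList.foldl
              (fun a c => a ++ [String.ofList [c]]) (acc.2 ++ ["<r>"])) ++ ["</r>"]))
      (d, t)
      = (d ++ (text_to_char_list_alt lst).1, t ++ (text_to_char_list_alt lst).2) := by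
  induction lst generalizing d t with
  | nil => simp [text_to_char_list_alt]
  | cons line rest ih =>
    simp only [List.foldl_cons]
    by_cases h1 : PySem.Str.isIn "IsTruthFul" line
    · rw [if_pos h1, ih, alt_skip line rest h1]
    · rw [if_neg h1]
      by_cases h2 : PySem.Str.pyGet? line 0 = some '0'
      · rw [if_pos h2, seg_eq, ih, alt_d line rest h1 h2]
        simp
      · rw [if_neg h2, seg_eq, ih, alt_t line rest h1 h2]
        simp

-- ===== VERDICT (by name: the statement is the Claim_ definition above) =====
theorem text_to_char_list_spec : Claim_equal_text_to_char_list := by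
  intro lst _ _
  unfold Spec_text_to_char_list text_to_char_list
  rw [fold_eq]
  simp
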